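-- pv_equiv track=rewrite | github.com/Cr7diesel/Homework_regex | main.py | merging_identical
-- ===== SOURCE A (Python) =====
-- def merging_identical(corrected_lst):
--     final_lst = []
--     for initials in range(len(corrected_lst)):
--         for doubles in range(len(corrected_lst)):
--             if corrected_lst[initials][0] == corrected_lst[doubles][0]:
--                 corrected_lst[initials] = [i or j for i, j in zip(corrected_lst[initials], corrected_lst[doubles])]
--         if corrected_lst[initials] not in final_lst:
--             final_lst.append(corrected_lst[initials])
--     return final_lst
-- ===== SOURCE B (Python) =====
-- def merging_identical(corrected_lst):
--     # One pass builds per-key column-wise merged templates; second pass maps each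
--     # row through its template and dedups with a set.  (Return value only: unlike
--     # the original, this does not mutate corrected_lst in place.)
--     templates = {}
--     for row in corrected_lst:
--         key = row[0]
--         if key in templates:
--             templates[key] = [i or j for i, j in zip(templates[key], row)]
--         else:
--             templates[key] = row
--     final_lst = []
--     seen = set()
--     for row in corrected_lst:
--         merged = [i or j for i, j in zip(row, templates[row[0]])]
--         t = tuple(merged)
--         if t not in seen:
--             seen.add(t)
--             final_lst.append(merged)
--     return final_lst
-- ===== Notes on version B (the rewrite author's own statement) =====
-- stated objective: faster
-- what changed: A's O(n^2) nested index loops that repeatedly OR-merge rows in place are replaced by one dict pass building a per-first-element column-wise merged template and one pass mapping each row through its template with set-based dedup.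
import Mathlib
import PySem

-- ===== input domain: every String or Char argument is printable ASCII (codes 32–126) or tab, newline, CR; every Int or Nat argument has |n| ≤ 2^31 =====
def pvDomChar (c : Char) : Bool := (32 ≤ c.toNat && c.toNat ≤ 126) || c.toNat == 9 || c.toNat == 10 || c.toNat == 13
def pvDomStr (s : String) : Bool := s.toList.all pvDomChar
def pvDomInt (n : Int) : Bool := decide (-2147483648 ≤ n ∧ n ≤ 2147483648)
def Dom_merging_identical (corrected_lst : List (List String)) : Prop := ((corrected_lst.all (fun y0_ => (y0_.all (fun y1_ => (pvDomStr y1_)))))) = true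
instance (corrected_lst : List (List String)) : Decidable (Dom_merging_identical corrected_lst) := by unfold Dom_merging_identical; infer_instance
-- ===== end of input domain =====

-- B replaces A's quadratic merge-in-place (each row re-scanned against every row) by one
-- dict pass building a per-key column-wise template plus one mapping/dedup pass.
-- A mutates its argument in place; B does not — the equivalence proved is about the RETURN value only.

-- ===== PORT A =====
-- Python `i or j` on strings: i if truthy (nonempty) else j
def pvOr (a b : String) : String := if a = "" then b else a
-- `[i or j for i, j in zip(xs, ys)]`
def pvZip : List String → List String → List String
  | a :: as, b :: bs => pvOr a b :: pvZip as bs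
  | _, _ => []

def merging_identical (corrected_lst : List (List String)) : List (List String) :=
  -- rows are indexed 0..n-1; the list is mutated in place, final_lst accumulated
  let n := corrected_lst.length
  ((List.range n).foldl
    (fun (st : List (List String) × List (List String)) i =>
      let lst := (List.range n).foldl
        (fun lst j =>
          if (lst.getD i []).headD "" = (lst.getD j []).headD ""
          then lst.set i (pvZip (lst.getD i []) (lst.getD j []))
          else lst)
        st.1
      (lst, if lst.getD i [] ∈ st.2 then st.2 else st.2 ++ [lst.getD i []]))
    (corrected_lst, [])).2

-- ===== PORT B =====
def merging_identical_alt (corrected_lst : List (List String)) : List (List String) :=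
  let templates : PySem.Dict String (List String) :=
    corrected_lst.foldl
      (fun d row =>
        let key := row.headD ""
        if d.contains key then d.insert key (pvZip (d.getD key []) row)
        else d.insert key row)
      PySem.Dict.empty
  (corrected_lst.foldl
    (fun (st : List (List String) × PySem.Set (List String)) row =>
      let merged := pvZip row (templates.getD (row.headD "") [])
      if PySem.Set.contains st.2 merged then st
      else (st.1 ++ [merged], PySem.Set.add st.2 merged))
    ([], PySem.Set.empty)).1

-- ===== PRECONDITION & SPEC =====
-- Python A evaluates row[0] for every row, so any empty row raises IndexError; B raises there too.
def Pre_merging_identical (corrected_lst : List (List String)) : Prop :=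
  ∀ row ∈ corrected_lst, row ≠ []
instance (corrected_lst : List (List String)) : Decidable (Pre_merging_identical corrected_lst) := by
  unfold Pre_merging_identical; infer_instance
def pvWitness_merging_identical : List (List String) := [["a", ""], ["b", "x"], ["a", "y"]]

def Spec_merging_identical (corrected_lst : List (List String)) (out : List (List String)) : Prop := out = merging_identical_alt corrected_lst
instance (corrected_lst : List (List String)) (out : List (List String)) : Decidable (Spec_merging_identical corrected_lst out) := by unfold Spec_merging_identical; infer_instance

-- ===== CLAIM (what is proved, stated in full; the proofs are below) =====
def Claim_equal_merging_identical : Prop := ∀ (corrected_lst : List (List String)), Dom_merging_identical corrected_lst → Pre_merging_identical corrected_lst → Spec_merging_identical corrected_lst (merging_identical corrected_lst)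

-- ===== LEMMAS AND PROOFS =====

-- the group of rows of L sharing first element k, in order
def pvGrp (L : List (List String)) (k : String) : List (List String) :=
  L.filter (fun r => decide (r.headD "" = k))
-- the value A leaves in a row (and B computes for it): the or-fold of its group onto it
def pvMrow (L : List (List String)) (r : List String) : List String :=
  (pvGrp L (r.headD "")).foldl pvZip r
-- dedup-append step
def pvDed (acc : List (List String)) (m : List String) : List (List String) :=
  if m ∈ acc then acc else acc ++ [m]
-- the common normal form of both programs' outputs
def pvCanon (L : List (List String)) : List (List String) :=
  (L.map (pvMrow L)).foldl pvDed []
-- A's list state after the first i outer iterations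
def pvMix (L : List (List String)) (i : Nat) : List (List String) :=
  (L.take i).map (pvMrow L) ++ L.drop i

-- ---- band algebra of pvZip (associative, idempotent, left-regular) ----
theorem pvOr_assoc (a b c : String) : pvOr (pvOr a b) c = pvOr a (pvOr b c) := by
  unfold pvOr; split_ifs <;> simp_all

theorem pvZip_assoc (a b c : List String) : pvZip (pvZip a b) c = pvZip a (pvZip b c) := by
  induction a generalizing b c with
  | nil => cases b <;> cases c <;> simp [pvZip]
  | cons x xs ih =>
    cases b <;> cases c <;> simp [pvZip, pvOr_assoc, ih]

theorem pvZip_self (a : List String) : pvZip a a = a := by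
  induction a with
  | nil => rfl
  | cons x xs ih => simp [pvZip, pvOr, ih]

theorem pvZip_lr (v c : List String) : pvZip (pvZip v c) v = pvZip v c := by
  induction v generalizing c with
  | nil => cases c <;> simp [pvZip]
  | cons x xs ih =>
    cases c with
    | nil => simp [pvZip]
    | cons y ys =>
      simp only [pvZip, ih]
      congr 1
      unfold pvOr; split_ifs <;> simp_all

theorem pvZip_hom (x b : List String) (l : List (List String)) :
    pvZip x (l.foldl pvZip b) = l.foldl pvZip (pvZip x b) := by
  induction l generalizing b with
  | nil => rfl
  | cons c l ih => simp [List.foldl, ih, pvZip_assoc]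

theorem pv_absorb_step (a v c : List String) (h : pvZip a v = a) :
    pvZip (pvZip a c) v = pvZip a c := by
  conv_lhs => rw [← h]
  rw [pvZip_assoc a v c, pvZip_assoc a (pvZip v c) v, pvZip_lr, ← pvZip_assoc, h]

theorem pv_absorb_foldl (l : List (List String)) (a v : List String) (h : pvZip a v = a) :
    pvZip (l.foldl pvZip a) v = l.foldl pvZip a := by
  induction l generalizing a with
  | nil => exact h
  | cons c l ih => exact ih _ (pv_absorb_step a v c h)

theorem pv_absorb_mem (l : List (List String)) : ∀ (b y : List String), y ∈ l →
    pvZip (l.foldl pvZip b) y = l.foldl pvZip b := by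
  induction l with
  | nil => intro b y hy; cases hy
  | cons c l ih =>
    intro b y hy
    simp only [List.foldl_cons]
    rcases List.mem_cons.1 hy with rfl | hy'
    · exact pv_absorb_foldl l (pvZip b y) y (by rw [pvZip_assoc, pvZip_self])
    · exact ih _ y hy'

theorem pv_absorb_fold (l : List (List String)) (a b : List String)
    (hb : pvZip a b = a) (hl : ∀ y ∈ l, pvZip a y = a) :
    pvZip a (l.foldl pvZip b) = a := by
  induction l generalizing b with
  | nil => exact hb
  | cons c l ih =>
    refine ih _ ?_ (fun y hy => hl y (List.mem_cons_of_mem _ hy))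
    rw [← pvZip_assoc, hb, hl c (List.mem_cons_self ..)]

theorem pv_foldl_id (l : List (List String)) (a : List String)
    (hl : ∀ y ∈ l, pvZip a y = a) : l.foldl pvZip a = a := by
  induction l with
  | nil => rfl
  | cons c l ih =>
    rw [List.foldl_cons, hl c (List.mem_cons_self ..)]
    exact ih (fun y hy => hl y (List.mem_cons_of_mem _ hy))

-- the central identity: folding the already-merged prefix rows, then the untouched suffix
-- rows, onto r gives the plain group fold onto r
theorem pv_band_main (pre post : List (List String)) (r : List String) :
    post.foldl pvZip ((pre.map (fun p => (pre ++ r :: post).foldl pvZip p)).foldl pvZip r)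
      = (pre ++ r :: post).foldl pvZip r := by
  cases pre with
  | nil =>
    simp [pvZip_self]
  | cons p pre' =>
    set G : List (List String) := p :: (pre' ++ r :: post) with hG
    have hApre' : ∀ q ∈ pre', q ∈ G := fun q hq => by
      simp [hG, List.mem_append, hq]
    have hpost : ∀ q ∈ post, q ∈ G := fun q hq => by
      simp [hG, List.mem_append, hq]
    have hA1 : ∀ y ∈ G, pvZip (G.foldl pvZip (pvZip r p)) y = G.foldl pvZip (pvZip r p) :=
      fun y hy => pv_absorb_mem G (pvZip r p) y hy
    have step1 : pvZip r (G.foldl pvZip p) = G.foldl pvZip (pvZip r p) := pvZip_hom _ _ _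
    have habs : ∀ m ∈ pre'.map (fun q => G.foldl pvZip q),
        pvZip (G.foldl pvZip (pvZip r p)) m = G.foldl pvZip (pvZip r p) := by
      intro m hm
      rcases List.mem_map.1 hm with ⟨q, hq, rfl⟩
      refine pv_absorb_fold _ _ _ (hA1 q (hApre' q hq)) ?_
      intro y hy; exact hA1 y hy
    have hmid : ((pre'.map (fun q => G.foldl pvZip q)).foldl pvZip
        (G.foldl pvZip (pvZip r p))) = G.foldl pvZip (pvZip r p) :=
      pv_foldl_id _ _ habs
    have hend : post.foldl pvZip (G.foldl pvZip (pvZip r p)) = G.foldl pvZip (pvZip r p) :=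
      pv_foldl_id _ _ (fun y hy => hA1 y (hpost y hy))
    have hfin : G.foldl pvZip (pvZip r p) = G.foldl pvZip r := by
      conv_lhs => rw [hG]
      conv_rhs => rw [hG]
      rw [List.foldl_cons, List.foldl_cons, pvZip_assoc, pvZip_self]
    have hG2 : (p :: pre') ++ r :: post = G := by rw [hG]; rfl
    calc post.foldl pvZip (((p :: pre').map (fun q => G.foldl pvZip q)).foldl pvZip r)
        = post.foldl pvZip ((pre'.map (fun q => G.foldl pvZip q)).foldl pvZip
            (pvZip r (G.foldl pvZip p))) := by rw [List.map_cons, List.foldl_cons]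
      _ = G.foldl pvZip r := by rw [step1, hmid, hend, hfin]

-- ---- shape facts ----
theorem pvZip_ne_nil (a b : List String) (ha : a ≠ []) (hb : b ≠ []) : pvZip a b ≠ [] := by
  cases a <;> cases b <;> simp_all [pvZip]

theorem pvZip_head_same (a b : List String) (h : a.headD "" = b.headD "") :
    (pvZip a b).headD "" = a.headD "" := by
  cases a <;> cases b <;> simp_all [pvZip, pvOr]

theorem pv_fold_ne_nil (l : List (List String)) (b : List String)
    (hb : b ≠ []) (hl : ∀ y ∈ l, y ≠ []) : l.foldl pvZip b ≠ [] := by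
  induction l generalizing b with
  | nil => exact hb
  | cons c l ih =>
    exact ih _ (pvZip_ne_nil _ _ hb (hl c (List.mem_cons_self ..)))
      (fun y hy => hl y (List.mem_cons_of_mem _ hy))

theorem pv_fold_head (l : List (List String)) (b : List String) (k : String)
    (hb : b.headD "" = k) (hl : ∀ y ∈ l, y.headD "" = k) :
    (l.foldl pvZip b).headD "" = k := by
  induction l generalizing b with
  | nil => exact hb
  | cons c l ih =>
    refine ih _ ?_ (fun y hy => hl y (List.mem_cons_of_mem _ hy))
    rw [pvZip_head_same b c (by rw [hb, hl c (List.mem_cons_self ..)])]; exact hb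

theorem pvMrow_ne_nil (L : List (List String)) (r : List String)
    (hPre : ∀ row ∈ L, row ≠ []) (hr : r ≠ []) : pvMrow L r ≠ [] := by
  refine pv_fold_ne_nil _ _ hr ?_
  intro y hy; exact hPre y (List.mem_of_mem_filter hy)

theorem pvMrow_head (L : List (List String)) (r : List String) :
    (pvMrow L r).headD "" = r.headD "" := by
  refine pv_fold_head _ _ _ rfl ?_
  intro y hy
  have := List.of_mem_filter hy
  simpa using this

-- ---- generic fold plumbing ----
theorem pv_foldl_range_getD {α β : Type} (l : List α) (d : α) (g : β → α → β) (s : β) :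
    (List.range l.length).foldl (fun c t => g c (l.getD t d)) s = l.foldl g s := by
  induction l generalizing s with
  | nil => rfl
  | cons a l ih =>
    rw [List.length_cons, List.range_succ_eq_map, List.foldl_cons, List.foldl_map]
    simpa using ih (g s a)

theorem pv_foldl_congr_mem {α β : Type} (l : List α) (f g : β → α → β) (s : β)
    (h : ∀ (c : β), ∀ x ∈ l, f c x = g c x) : l.foldl f s = l.foldl g s := by
  induction l generalizing s with
  | nil => rfl
  | cons a l ih =>
    rw [List.foldl_cons, List.foldl_cons, h s a (List.mem_cons_self ..)]
    exact ih _ (fun c x hx => h c x (List.mem_cons_of_mem _ hx))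

-- curStep: one inner-loop body step acting on the running row
def pvCur (v cur : List String) : List String :=
  if cur.headD "" = v.headD "" then pvZip cur v else cur

theorem pv_curfold_filter (xs : List (List String)) (cur : List String) (k : String)
    (hc : cur ≠ []) (hk : cur.headD "" = k) (hxs : ∀ x ∈ xs, x ≠ []) :
    xs.foldl (fun c x => pvCur x c) cur
      = (xs.filter (fun x => decide (x.headD "" = k))).foldl pvZip cur := by
  induction xs generalizing cur with
  | nil => rfl
  | cons x xs ih =>
    by_cases hx : x.headD "" = k
    · have hcond : cur.headD "" = x.headD "" := by rw [hk, hx]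
      have h1 : pvCur x cur = pvZip cur x := by rw [pvCur, if_pos hcond]
      rw [List.foldl_cons, h1, List.filter_cons_of_pos (by simpa using hx), List.foldl_cons]
      exact ih (pvZip cur x)
        (pvZip_ne_nil _ _ hc (hxs x (List.mem_cons_self ..)))
        (by rw [pvZip_head_same _ _ hcond, hk])
        (fun y hy => hxs y (List.mem_cons_of_mem _ hy))
    · have h1 : pvCur x cur = cur := by
        rw [pvCur, if_neg (by rw [hk]; exact fun hh => hx hh.symm)]
      rw [List.foldl_cons, h1, List.filter_cons_of_neg (by simpa using hx)]
      exact ih cur hc hk (fun y hy => hxs y (List.mem_cons_of_mem _ hy))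

-- ---- the inner loop ----
theorem pv_thread (i : Nat) (js : List Nat) :
    ∀ (lst : List (List String)), i < lst.length →
    js.foldl (fun lst j =>
        if (lst.getD i []).headD "" = (lst.getD j []).headD ""
        then lst.set i (pvZip (lst.getD i []) (lst.getD j []))
        else lst) lst
      = lst.set i (js.foldl
          (fun cur j => pvCur (if j = i then cur else lst.getD j []) cur) (lst.getD i [])) := by
  induction js with
  | nil =>
    intro lst hi
    simp only [List.foldl_nil]
    rw [List.getD_eq_getElem _ _ hi, List.set_getElem_self]
  | cons j js ih =>
    intro lst hi
    rw [List.foldl_cons, List.foldl_cons]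
    have hstep : (if (lst.getD i []).headD "" = (lst.getD j []).headD ""
        then lst.set i (pvZip (lst.getD i []) (lst.getD j []))
        else lst)
        = lst.set i (pvCur (if j = i then lst.getD i [] else lst.getD j []) (lst.getD i [])) := by
      by_cases hj : j = i
      · subst hj
        simp [pvCur]
      · rw [if_neg hj]
        unfold pvCur
        split_ifs with h
        · rfl
        · rw [List.getD_eq_getElem _ _ hi, List.set_getElem_self]
    rw [hstep]
    set cur1 := pvCur (if j = i then lst.getD i [] else lst.getD j []) (lst.getD i []) with hc1
    have hlen : i < (lst.set i cur1).length := by simpa using hi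
    rw [ih (lst.set i cur1) hlen, List.set_set]
    congr 1
    have hget : (lst.set i cur1).getD i [] = cur1 := by
      rw [List.getD_eq_getElem _ _ hlen]; simp
    rw [hget]
    refine pv_foldl_congr_mem _ _ _ _ ?_
    intro c x _
    by_cases hx : x = i
    · rw [if_pos hx, if_pos hx]
    · have hsame : (lst.set i cur1).getD x [] = lst.getD x [] := by
        by_cases hxl : x < lst.length
        · rw [List.getD_eq_getElem _ _ (by simpa using hxl), List.getD_eq_getElem _ _ hxl]
          exact List.getElem_set_ne (by omega) _
        · rw [List.getD_eq_default _ _ (by simpa using hxl), List.getD_eq_default _ _ (by simpa using hxl)]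
      rw [if_neg hx, if_neg hx, hsame]

-- ---- pvMix facts ----
theorem pvMix_length (L : List (List String)) (i : Nat) (h : i ≤ L.length) :
    (pvMix L i).length = L.length := by
  simp [pvMix, List.length_take, List.length_drop]; omega

theorem pvMix_getD_lt (L : List (List String)) (i j : Nat) (hj : j < i) (hi : i ≤ L.length) :
    (pvMix L i).getD j [] = pvMrow L (L.getD j []) := by
  have hjL : j < L.length := lt_of_lt_of_le hj hi
  have hjt : j < ((L.take i).map (pvMrow L)).length := by
    simp [List.length_take]; omega
  rw [pvMix, List.getD_eq_getElem _ _ (by simp [List.length_take, List.length_drop]; omega),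
    List.getElem_append_left hjt]
  simp [List.getElem_take, List.getElem?_eq_getElem hjL]

theorem pvMix_getD_ge (L : List (List String)) (i j : Nat) (hj : i ≤ j) :
    (pvMix L i).getD j [] = L.getD j [] := by
  have hlen : ((L.take i).map (pvMrow L)).length = min i L.length := by
    simp [List.length_take]
  rw [pvMix, List.getD_eq_getElem?_getD, List.getD_eq_getElem?_getD,
    List.getElem?_append_right (by rw [hlen]; omega), hlen]
  by_cases hjL : j < L.length
  · have hmin : min i L.length = i := by omega
    rw [hmin, List.getElem?_drop, show i + (j - i) = j from by omega]
  · rw [List.getElem?_eq_none (by simp [List.length_drop]; omega),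
      List.getElem?_eq_none (by omega)]

theorem pvMix_set (L : List (List String)) (i : Nat) (hi : i < L.length) :
    (pvMix L i).set i (pvMrow L (L.getD i [])) = pvMix L (i + 1) := by
  have hdrop : L.drop i = L[i] :: L.drop (i + 1) := (List.drop_eq_getElem_cons hi)
  have hlen : ((L.take i).map (pvMrow L)).length = i := by
    simp [List.length_take]; omega
  have htake0 : L.take (i + 1) = L.take i ++ [L[i]] := by
    rw [List.take_succ, List.getElem?_eq_getElem hi]; rfl
  have htake : (L.take (i + 1)).map (pvMrow L)
      = (L.take i).map (pvMrow L) ++ [pvMrow L L[i]] := by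
    rw [htake0, List.map_append]; rfl
  rw [pvMix, hdrop, pvMix, htake, List.getD_eq_getElem _ _ hi]
  rw [List.set_append_right _ _ (le_of_eq hlen), hlen, Nat.sub_self, List.set_cons_zero]
  simp [List.append_assoc]

-- range n split at i < n
theorem pv_range_split (i n : Nat) (h : i < n) :
    List.range n = List.range i ++ i :: (List.range (n - i - 1)).map (fun t => i + 1 + t) := by
  conv_lhs => rw [show n = (i + 1) + (n - i - 1) from by omega]
  rw [List.range_add, List.range_succ, List.append_assoc, List.singleton_append]

-- group decomposition at row i
theorem pvGrp_split (L : List (List String)) (i : Nat) (hi : i < L.length) :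
    pvGrp L ((L.getD i []).headD "")
      = (L.take i).filter (fun x => decide (x.headD "" = (L.getD i []).headD ""))
        ++ L.getD i [] :: (L.drop (i + 1)).filter (fun x => decide (x.headD "" = (L.getD i []).headD "")) := by
  rw [List.getD_eq_getElem _ _ hi]
  have hdrop : L.drop i = L[i] :: L.drop (i + 1) := List.drop_eq_getElem_cons hi
  have h1 : pvGrp L (L[i].headD "")
      = (L.take i).filter (fun x => decide (x.headD "" = L[i].headD ""))
        ++ (L.drop i).filter (fun x => decide (x.headD "" = L[i].headD "")) := by
    rw [pvGrp, ← List.filter_append, List.take_append_drop]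
  rw [h1, hdrop, List.filter_cons_of_pos (by simp)]

-- the inner loop starting from the mixed state computes pvMrow of row i
theorem pv_inner (L : List (List String)) (i : Nat) (hi : i < L.length)
    (hPre : ∀ row ∈ L, row ≠ []) :
    (List.range L.length).foldl
      (fun lst j =>
        if (lst.getD i []).headD "" = (lst.getD j []).headD ""
        then lst.set i (pvZip (lst.getD i []) (lst.getD j []))
        else lst) (pvMix L i)
      = pvMix L (i + 1) := by
  have hiL : i ≤ L.length := le_of_lt hi
  have hmixlen : i < (pvMix L i).length := by rw [pvMix_length L i hiL]; exact hi
  rw [pv_thread i _ _ hmixlen]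
  have hgeti : (pvMix L i).getD i [] = L.getD i [] := pvMix_getD_ge L i i (le_refl i)
  set r := L.getD i [] with hr
  set k := r.headD "" with hk
  have hrne : r ≠ [] := hPre r (by
    rw [hr, List.getD_eq_getElem _ _ hi]; exact List.getElem_mem _)
  -- evaluate the cur-fold
  have hcur : (List.range L.length).foldl
      (fun cur j => pvCur (if j = i then cur else (pvMix L i).getD j []) cur) ((pvMix L i).getD i [])
      = pvMrow L r := by
    rw [hgeti, pv_range_split i L.length hi]
    rw [List.foldl_append, List.foldl_cons, List.foldl_map]
    -- prefix: indices j < i read merged rows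
    have hpre1 : (List.range i).foldl
        (fun cur j => pvCur (if j = i then cur else (pvMix L i).getD j []) cur) r
        = ((L.take i).map (pvMrow L)).foldl (fun cur x => pvCur x cur) r := by
      rw [← pv_foldl_range_getD ((L.take i).map (pvMrow L)) [] (fun c x => pvCur x c) r]
      rw [show ((L.take i).map (pvMrow L)).length = i from by simp [List.length_take]; omega]
      refine pv_foldl_congr_mem _ _ _ _ ?_
      intro c j hj
      have hji : j < i := List.mem_range.1 hj
      have hjL : j < L.length := lt_of_lt_of_le hji hiL
      have : ((L.take i).map (pvMrow L)).getD j [] = pvMrow L (L.getD j []) := by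
        rw [List.getD_eq_getElem _ _ (by simp [List.length_take]; omega)]
        simp [List.getElem_take, List.getElem?_eq_getElem hjL]
      rw [if_neg (by omega), pvMix_getD_lt L i j hji hiL, this]
    set c1 := ((L.take i).map (pvMrow L)).foldl (fun cur x => pvCur x cur) r with hc1
    -- c1 as a filtered pvZip-fold
    have hprene : ∀ x ∈ (L.take i).map (pvMrow L), x ≠ [] := by
      intro x hx
      rcases List.mem_map.1 hx with ⟨q, hq, rfl⟩
      exact pvMrow_ne_nil L q hPre (hPre q (List.mem_of_mem_take hq))
    have hc1f : c1 = (((L.take i).filter (fun x => decide (x.headD "" = k))).map (pvMrow L)).foldl pvZip r := by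
      rw [hc1, pv_curfold_filter _ r k hrne rfl hprene, List.filter_map]
      congr 1
      refine congrArg _ (List.filter_congr ?_)
      intro x _
      simp only [Function.comp_apply, pvMrow_head]
    have hc1ne : c1 ≠ [] := by
      rw [hc1f]
      refine pv_fold_ne_nil _ _ hrne ?_
      intro y hy
      rcases List.mem_map.1 hy with ⟨q, hq, rfl⟩
      exact pvMrow_ne_nil L q hPre (hPre q (List.mem_of_mem_take (List.mem_of_mem_filter hq)))
    have hc1h : c1.headD "" = k := by
      rw [hc1f]
      refine pv_fold_head _ _ _ hk ?_
      intro y hy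
      rcases List.mem_map.1 hy with ⟨q, hq, rfl⟩
      rw [pvMrow_head]
      simpa using List.of_mem_filter hq
    -- middle step j = i is the identity
    have hmid : pvCur c1 c1 = c1 := by simp [pvCur, pvZip_self]
    rw [hpre1, if_pos rfl, hmid]
    -- suffix: indices j > i read original rows
    have hsuf : (List.range (L.length - i - 1)).foldl
        (fun cur t => pvCur (if i + 1 + t = i then cur else (pvMix L i).getD (i + 1 + t) []) cur) c1
        = (L.drop (i + 1)).foldl (fun cur x => pvCur x cur) c1 := by
      rw [← pv_foldl_range_getD (L.drop (i + 1)) [] (fun c x => pvCur x c) c1]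
      rw [show (L.drop (i + 1)).length = L.length - i - 1 from by simp [List.length_drop]; omega]
      refine pv_foldl_congr_mem _ _ _ _ ?_
      intro c t ht
      have htn : t < L.length - i - 1 := List.mem_range.1 ht
      have h1 : (L.drop (i + 1)).getD t [] = L.getD (i + 1 + t) [] := by
        rw [List.getD_eq_getElem _ _ (by simp [List.length_drop]; omega),
          List.getD_eq_getElem _ _ (by omega)]
        simp [List.getElem_drop]
      rw [if_neg (by omega), pvMix_getD_ge L i (i + 1 + t) (by omega), h1]
    rw [hsuf, pv_curfold_filter _ c1 k hc1ne hc1h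
      (fun y hy => hPre y (List.mem_of_mem_drop hy))]
    -- now the band identity
    have hsplit := pvGrp_split L i hi
    rw [pvMrow, ← hr, ← hk] at *
    set pre := (L.take i).filter (fun x => decide (x.headD "" = k)) with hpredef
    set post := (L.drop (i + 1)).filter (fun x => decide (x.headD "" = k)) with hpostdef
    rw [hc1f]
    have hmapeq : ((L.take i).filter (fun x => decide (x.headD "" = k))).map (pvMrow L)
        = pre.map (fun p => (pre ++ r :: post).foldl pvZip p) := by
      rw [← hpredef]
      refine List.map_congr_left ?_
      intro p hp
      rw [pvMrow, show p.headD "" = k from by simpa using List.of_mem_filter hp, ← hsplit]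
    rw [hmapeq, hsplit]
    exact pv_band_main pre post r
  rw [hcur, pvMix_set L i hi]

-- ---- the outer loop of A ----
theorem pv_outer (L : List (List String)) (hPre : ∀ row ∈ L, row ≠ []) :
    ∀ i, i ≤ L.length →
    (List.range i).foldl
      (fun (st : List (List String) × List (List String)) i =>
        let lst := (List.range L.length).foldl
          (fun lst j =>
            if (lst.getD i []).headD "" = (lst.getD j []).headD ""
            then lst.set i (pvZip (lst.getD i []) (lst.getD j []))
            else lst)
          st.1
        (lst, if lst.getD i [] ∈ st.2 then st.2 else st.2 ++ [lst.getD i []]))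
      (L, [])
      = (pvMix L i, ((L.take i).map (pvMrow L)).foldl pvDed []) := by
  intro i
  induction i with
  | zero => intro _; simp [pvMix]
  | succ i ih =>
    intro hi1
    have hi : i < L.length := by omega
    rw [List.range_succ, List.foldl_append, ih (le_of_lt hi), List.foldl_cons, List.foldl_nil]
    simp only
    rw [pv_inner L i hi hPre]
    have hget : (pvMix L (i + 1)).getD i [] = pvMrow L (L.getD i []) :=
      pvMix_getD_lt L (i + 1) i (by omega) (by omega)
    rw [hget]
    have htake0 : L.take (i + 1) = L.take i ++ [L[i]] := by
      rw [List.take_succ, List.getElem?_eq_getElem hi]; rfl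
    have htake : (L.take (i + 1)).map (pvMrow L)
        = (L.take i).map (pvMrow L) ++ [pvMrow L (L.getD i [])] := by
      rw [htake0, List.map_append, List.getD_eq_getElem _ _ hi]; rfl
    rw [htake, List.foldl_append, List.foldl_cons, List.foldl_nil, pvDed]

theorem pv_A_eq_canon (L : List (List String)) (hPre : ∀ row ∈ L, row ≠ []) :
    merging_identical L = pvCanon L := by
  unfold merging_identical pvCanon
  simp only
  rw [pv_outer L hPre L.length (le_refl _), List.take_length]

-- ---- B side ----
-- the dict built by B's first pass holds, at key k, the pvZip-fold of the k-group
theorem pv_dict (l : List (List String)) :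
    ∀ (d : PySem.Dict String (List String)) (k : String),
    (l.foldl
      (fun d row =>
        if d.contains (row.headD "") then d.insert (row.headD "") (pvZip (d.getD (row.headD "") []) row)
        else d.insert (row.headD "") row) d).get? k
    = match d.get? k with
      | some m => some ((l.filter (fun r => decide (r.headD "" = k))).foldl pvZip m)
      | none =>
        match l.filter (fun r => decide (r.headD "" = k)) with
        | [] => none
        | g :: gs => some (gs.foldl pvZip g)
    := by
  induction l with
  | nil =>
    intro d k
    rw [List.foldl_nil, List.filter_nil]
    cases hd : d.get? k <;> simp [hd]
  | cons r l ih =>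
    intro d k
    rw [List.foldl_cons]
    by_cases hk : r.headD "" = k
    · subst hk
      cases hd : d.get? (r.headD "") with
      | some m =>
        have hcont : d.contains (r.headD "") = true := by
          rw [PySem.Dict.contains_eq_isSome_get?, hd]; rfl
        rw [if_pos (by simpa using hcont), ih, PySem.Dict.get?_insert_self]
        rw [List.filter_cons_of_pos (by simp), PySem.Dict.getD_eq_get?_getD, hd]
        rfl
      | none =>
        have hcont : d.contains (r.headD "") = false := by
          rw [PySem.Dict.contains_eq_isSome_get?, hd]; rfl
        rw [if_neg (by simpa using hcont), ih, PySem.Dict.get?_insert_self]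
        rw [List.filter_cons_of_pos (by simp)]
    · have hne : k ≠ r.headD "" := fun h => hk h.symm
      have hfilter : (r :: l).filter (fun r => decide (r.headD "" = k))
          = l.filter (fun r => decide (r.headD "" = k)) := by
        rw [List.filter_cons_of_neg (by simpa using hk)]
      rw [hfilter]
      split_ifs with hcont <;>
        rw [ih, PySem.Dict.get?_insert_of_ne _ _ hne]

-- the pair fold of B's second pass projects to the plain dedup fold
theorem pv_pair (l : List (List String)) (f : List String → List String) :
    ∀ (acc : List (List String)),
    (l.foldl
      (fun (st : List (List String) × PySem.Set (List String)) row =>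
        if PySem.Set.contains st.2 (f row) then st
        else (st.1 ++ [f row], PySem.Set.add st.2 (f row)))
      (acc, acc)).1
    = l.foldl (fun acc row => pvDed acc (f row)) acc := by
  induction l with
  | nil => intro acc; rfl
  | cons r l ih =>
    intro acc
    rw [List.foldl_cons, List.foldl_cons]
    simp only
    by_cases hm : f r ∈ acc
    · rw [if_pos (by simpa [PySem.Set.contains] using hm), pvDed, if_pos hm]
      exact ih acc
    · rw [if_neg (by simpa [PySem.Set.contains] using hm), pvDed, if_neg hm]
      have hadd : PySem.Set.add acc (f r) = acc ++ [f r] := by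
        simp [PySem.Set.add, PySem.Set.contains, hm]
      rw [hadd]
      exact ih (acc ++ [f r])

theorem pv_B_eq_canon (L : List (List String)) :
    merging_identical_alt L = pvCanon L := by
  unfold merging_identical_alt pvCanon
  simp only
  rw [show (PySem.Set.empty : PySem.Set (List String)) = [] from rfl]
  rw [pv_pair L _ []]
  rw [List.foldl_map]
  refine pv_foldl_congr_mem _ _ _ _ ?_
  intro acc r hr
  congr 1
  -- templates.getD (r.headD "") [] is the fold of r's group
  have hrgrp : r ∈ pvGrp L (r.headD "") := by
    rw [pvGrp, List.mem_filter]; exact ⟨hr, by simp⟩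
  have hget := pv_dict L PySem.Dict.empty (r.headD "")
  rw [PySem.Dict.get?_empty] at hget
  cases hgrp : pvGrp L (r.headD "") with
  | nil => rw [hgrp] at hrgrp; cases hrgrp
  | cons g gs =>
    rw [pvGrp] at hgrp
    rw [hgrp] at hget
    rw [PySem.Dict.getD_eq_get?_getD, hget]
    simp only [Option.getD_some]
    rw [pvZip_hom, pvMrow, pvGrp, hgrp, List.foldl_cons]

-- ===== VERDICT (by name: the statement is the Claim_ definition above) =====
theorem merging_identical_spec : Claim_equal_merging_identical := by
  intro L _ hPre
  unfold Spec_merging_identical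
  rw [pv_A_eq_canon L hPre, pv_B_eq_canon L]
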